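-- pv_equiv track=rewrite | github.com/Mai19930513/SamsungTestFirmwareVersionDecrypt | 三星测试版固件版本号解密.py | getLatestVersion
-- ===== SOURCE A (Python) =====
-- def getLatestVersion(version_list, chars):
--     """
--     过滤倒数第四位为指定字符集的版本号，并按后三位升序，返回最大的版本号。
--     :param version_list: 版本号字符串列表
--     :param chars: 指定倒数第四位字符集（如 "ZAB"）
--     :return: 最大版本号字符串（如无则返回None）
--     """
--     order = "0123456789ABCDEFGHIJKLMNOPQRSTUVWXYZ"
--     order_map = {c: i for i, c in enumerate(order)}
--
--     def get_tail4(s):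
--         first_part = s.split("/")[0]
--         return first_part[-4:] if len(first_part) >= 4 else first_part
--
--     # 支持多个字符过滤
--     filtered = [
--         s for s in version_list if len(get_tail4(s)) == 4 and get_tail4(s)[0] in chars
--     ]
--     if not filtered:
--         return None
--
--     def last3_key(s):
--         tail4 = get_tail4(s)
--         return tuple(order_map.get(c, -1) for c in tail4[1:])
--
--     return max(filtered, key=last3_key)
-- ===== SOURCE B (Python) =====
-- def getLatestVersion(version_list, chars):
--     """Decorate-sort-undecorate: pack each candidate's last-3 ranks into one
--     base-37 integer, stable-sort the (rank, version) pairs descending and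
--     return the first one (stability makes the earliest key-tie win, like max)."""
--     order = "0123456789ABCDEFGHIJKLMNOPQRSTUVWXYZ"
--     decorated = []
--     for s in version_list:
--         fp = s.split("/")[0]
--         if len(fp) >= 4 and fp[-4] in chars:
--             rank = 0
--             for c in fp[-3:]:
--                 rank = rank * 37 + order.find(c) + 1
--             decorated.append((rank, s))
--     decorated.sort(key=lambda p: p[0], reverse=True)
--     return decorated[0][1] if decorated else None
-- ===== Notes on version B (the rewrite author's own statement) =====
-- stated objective: alternative
-- what changed: Replaces filter-comprehension plus max over a lexicographic index tuple by decorate-sort-undecorate: one pass packs each candidate's last-3 character ranks into a single base-37 integer key, the (key, version) pairs are stable-sorted descending and the head is returned (stability makes the earliest key-tie win exactly as max does).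
import Mathlib
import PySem

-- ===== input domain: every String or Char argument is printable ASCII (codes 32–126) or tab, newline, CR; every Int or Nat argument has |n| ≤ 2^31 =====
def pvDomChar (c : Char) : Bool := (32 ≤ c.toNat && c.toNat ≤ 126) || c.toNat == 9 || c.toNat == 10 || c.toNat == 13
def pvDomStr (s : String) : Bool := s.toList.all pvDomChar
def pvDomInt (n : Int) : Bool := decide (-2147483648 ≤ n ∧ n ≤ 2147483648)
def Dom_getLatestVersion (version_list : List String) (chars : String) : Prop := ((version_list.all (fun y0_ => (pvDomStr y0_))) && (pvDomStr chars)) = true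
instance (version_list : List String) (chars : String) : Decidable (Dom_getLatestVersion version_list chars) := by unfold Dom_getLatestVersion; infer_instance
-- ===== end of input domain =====

-- B replaces A's filter-comprehension-plus-max (tuple key, char→index dict) by
-- decorate-sort-undecorate: one pass packs each candidate's last-3 ranks into a
-- base-37 integer, the (rank, version) pairs are stable-sorted descending and
-- the head is returned (objective: alternative algorithm, same result).

-- ===== PORT A =====
def pvOrder : List Char := "0123456789ABCDEFGHIJKLMNOPQRSTUVWXYZ".toList

-- order_map = {c: i for i, c in enumerate(order)}
def pvOrderMap : PySem.Dict Char Int :=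
  (PySem.List.enumerate pvOrder 0).foldl (fun d p => d.insert p.2 p.1) PySem.Dict.empty

-- get_tail4: s.split("/")[0], last 4 chars if long enough; the [0] cannot raise (split is never empty)
def pvTail4 (s : String) : List Char :=
  let fp := PySem.List.pyGetD (PySem.Chars.splitOn s.toList ['/']) 0 []
  if 4 ≤ fp.length then PySem.Chars.slice fp (some (-4)) none else fp

-- last3_key: tuple(order_map.get(c, -1) for c in tail4[1:])
def pvLast3Key (s : String) : List Int :=
  (PySem.Chars.slice (pvTail4 s) (some 1) none).map (fun c => pvOrderMap.getD c (-1))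

-- Python's '<' on int tuples (lexicographic); used to transcribe max(filtered, key=…)
def pvKeyLt : List Int → List Int → Bool
  | [], [] => false
  | [], _ :: _ => true
  | _ :: _, [] => false
  | a :: as, b :: bs => if a < b then true else if b < a then false else pvKeyLt as bs

-- the comprehension's condition: len(get_tail4(s)) == 4 and get_tail4(s)[0] in chars
def pvCond (chars : String) (s : String) : Bool :=
  decide ((pvTail4 s).length = 4) &&
    (match PySem.List.pyGet? (pvTail4 s) 0 with
     | some c => PySem.Str.isIn (String.ofList [c]) chars
     | none => false)

def getLatestVersion (version_list : List String) (chars : String) : Option String :=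
  match version_list.filter (pvCond chars) with
  | [] => none
  -- CPython's max: scan left to right, replace only on strictly greater key (first wins ties)
  | h :: t => some (t.foldl (fun best x =>
      if pvKeyLt (pvLast3Key best) (pvLast3Key x) then x else best) h)

-- ===== PORT B =====
-- the inner loop: rank = rank * 37 + order.find(c) + 1 over fp[-3:]
def pvRank (fp : List Char) : Int :=
  (PySem.Chars.slice fp (some (-3)) none).foldl
    (fun r c => r * 37 + PySem.Str.find (String.ofList pvOrder) (String.ofList [c]) + 1) 0

-- the loop body building `decorated`
def pvDecorStep (chars : String) (acc : List (Int × String)) (s : String) : List (Int × String) :=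
  let fp := PySem.List.pyGetD (PySem.Chars.splitOn s.toList ['/']) 0 []
  if 4 ≤ fp.length then
    match PySem.List.pyGet? fp (-4) with
    | some c0 =>
        if PySem.Str.isIn (String.ofList [c0]) chars then acc ++ [(pvRank fp, s)] else acc
    | none => acc  -- unreachable: len(fp) ≥ 4 puts index -4 in range
  else acc

-- decorated.sort(key=..., reverse=True); return decorated[0][1] if decorated else None
def getLatestVersion_alt (version_list : List String) (chars : String) : Option String :=
  match PySem.List.sorted (version_list.foldl (pvDecorStep chars) []) Prod.fst true with
  | [] => none
  | p :: _ => some p.2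

-- ===== PRECONDITION & SPEC =====
def Spec_getLatestVersion (version_list : List String) (chars : String) (out : Option String) : Prop := out = getLatestVersion_alt version_list chars
instance (version_list : List String) (chars : String) (out : Option String) : Decidable (Spec_getLatestVersion version_list chars out) := by unfold Spec_getLatestVersion; infer_instance

-- ===== CLAIM (what is proved, stated in full; the proofs are below) =====
def Claim_equal_getLatestVersion : Prop := ∀ (version_list : List String) (chars : String), Dom_getLatestVersion version_list chars → Spec_getLatestVersion version_list chars (getLatestVersion version_list chars)

-- ===== LEMMAS AND PROOFS =====

-- B's packed rank of a qualifying string, as a function of the string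
def pvRankS (s : String) : Int :=
  pvRank (PySem.List.pyGetD (PySem.Chars.splitOn s.toList ['/']) 0 [])

theorem find_go_singleton (c : Char) (l : List Char) (k : Nat) :
    PySem.Chars.find.go [c] l k =
      if c ∈ l then ((k : Int) + l.idxOf c) else -1 := by
  induction l generalizing k with
  | nil => simp [PySem.Chars.find.go]
  | cons h t ih =>
    by_cases hc : c = h
    · subst hc
      simp [PySem.Chars.find.go, List.isPrefixOf]
    · simp [PySem.Chars.find.go, List.isPrefixOf, hc, ih, Ne.symm hc]
      split_ifs <;> push_cast <;> ring

theorem dict_enum_get? (l : List Char) (hl : l.Nodup) :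
    ∀ (n : Int) (d : PySem.Dict Char Int) (c : Char),
      ((PySem.List.enumerate l n).foldl (fun d p => d.insert p.2 p.1) d).get? c =
        if c ∈ l then some (n + l.idxOf c) else d.get? c := by
  induction l with
  | nil => intro n d c; simp [PySem.List.enumerate]
  | cons h t ih =>
    intro n d c
    have hnd := hl
    simp only [List.nodup_cons] at hnd
    simp only [PySem.List.enumerate, List.foldl_cons]
    rw [ih hnd.2 (n+1) (d.insert h n) c]
    by_cases hc : c = h
    · subst hc
      simp [hnd.1, PySem.Dict.get?_insert]
    · by_cases hct : c ∈ t
      · simp [hct, hc, Ne.symm hc]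
        push_cast; ring
      · simp [hct, hc, PySem.Dict.get?_insert]

-- A's dict lookup with default -1 IS B's order.find of the one-char needle
theorem rank_eq (c : Char) :
    pvOrderMap.getD c (-1) = PySem.Str.find (String.ofList pvOrder) (String.ofList [c]) := by
  have h1 := dict_enum_get? pvOrder (by decide) 0 PySem.Dict.empty c
  have h2 := find_go_singleton c pvOrder 0
  simp [pvOrderMap, PySem.Dict.getD, h1, PySem.Str.find_eq, PySem.Chars.find, h2]
  by_cases hc : c ∈ pvOrder <;> simp [hc, PySem.Dict.get?]

theorem find_bounds (c : Char) :
    -1 ≤ PySem.Str.find (String.ofList pvOrder) (String.ofList [c]) ∧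
      PySem.Str.find (String.ofList pvOrder) (String.ofList [c]) ≤ 35 := by
  have h2 := find_go_singleton c pvOrder 0
  simp [PySem.Str.find_eq, PySem.Chars.find, h2]
  by_cases hc : c ∈ pvOrder
  · have h1 : pvOrder.idxOf c < pvOrder.length := List.idxOf_lt_length_of_mem hc
    have h36 : pvOrder.length = 36 := by decide
    simp [hc]; omega
  · simp [hc]

theorem slice_neg4 {α : Type} (fp : List α) (h : 4 ≤ fp.length) :
    PySem.List.slice fp (some (-4)) none = fp.drop (fp.length - 4) := by
  simp [PySem.List.slice, PySem.List.clampIdx]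
  rw [if_neg (by omega)]
  have h2 : ((fp.length : Int) + -4).toNat = fp.length - 4 := by omega
  rw [h2, List.take_of_length_le (by simp)]

theorem slice_neg3 {α : Type} (fp : List α) (h : 3 ≤ fp.length) :
    PySem.List.slice fp (some (-3)) none = fp.drop (fp.length - 3) := by
  simp [PySem.List.slice, PySem.List.clampIdx]
  rw [if_neg (by omega)]
  have h2 : ((fp.length : Int) + -3).toNat = fp.length - 3 := by omega
  rw [h2, List.take_of_length_le (by simp)]

theorem length_slice_neg4 {α : Type} (fp : List α) (h : 4 ≤ fp.length) :
    (PySem.List.slice fp (some (-4)) none).length = 4 := by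
  rw [slice_neg4 fp h]; simp; omega

-- B's loop body through A's filter condition and packed key
theorem stepB_eq (chars : String) (acc : List (Int × String)) (s : String) :
    pvDecorStep chars acc s =
      if pvCond chars s then acc ++ [(pvRankS s, s)] else acc := by
  unfold pvDecorStep pvCond pvRankS pvTail4
  set fp := PySem.List.pyGetD (PySem.Chars.splitOn s.toList ['/']) 0 [] with hfp
  by_cases hlen : 4 ≤ fp.length
  · simp only [if_pos hlen]
    have h4 : (PySem.List.slice fp (some (-4)) none).length = 4 := length_slice_neg4 fp hlen
    have hdrop : PySem.List.slice fp (some (-4)) none = fp.drop (fp.length - 4) :=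
      slice_neg4 fp hlen
    match htl : PySem.List.slice fp (some (-4)) none with
    | [] => rw [htl] at h4; simp at h4
    | c0 :: rest =>
      rw [htl] at h4 hdrop
      have hget : PySem.List.pyGet? fp (-4) = some c0 := by
        simp [PySem.List.pyGet?, PySem.List.pyIdx?]
        rw [if_pos hlen]
        simp only [Option.bind_some]
        have h0 : (fp.drop (fp.length - 4))[0]? = fp[fp.length - 4 + 0]? := List.getElem?_drop
        rw [← hdrop] at h0
        simpa using h0.symm
      have hget0 : PySem.List.pyGet? (PySem.Chars.slice fp (some (-4)) none) (0 : Int) = some c0 := by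
        simp [PySem.Chars.slice, htl, PySem.List.pyGet?, PySem.List.pyIdx?]
      simp only [PySem.Chars.slice] at hget0 ⊢
      simp only [hget, htl, hget0, h4]
      simp
  · simp only [if_neg hlen]
    have : ¬ (fp.length = 4) := by omega
    simp [hlen, this]

-- `decorated` is A's filtered list, decorated with the packed rank
theorem decorated_eq (chars : String) (version_list : List String) :
    version_list.foldl (pvDecorStep chars) [] =
      (version_list.filter (pvCond chars)).map (fun s => (pvRankS s, s)) := by
  have hstep : pvDecorStep chars =
      fun acc s => if pvCond chars s then acc ++ [(pvRankS s, s)] else acc := by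
    funext acc s; exact stepB_eq chars acc s
  rw [hstep, PySem.List.foldl_append_if (pvCond chars) (fun s => (pvRankS s, s))]
  simp

-- head of the reverse-stable insertion fold = left-to-right running max with strict >
theorem head_foldl_insertBy {α : Type} (key : α → Int) :
    ∀ (t : List α) (acc : List α) (b : α), acc.head? = some b →
      (t.foldl (fun acc x => PySem.List.insertBy (fun a b => decide (key b < key a)) x acc) acc).head?
        = some (t.foldl (fun best x => if key best < key x then x else best) b) := by
  intro t
  induction t with
  | nil => intro acc b h; simpa using h
  | cons x xs ih =>
    intro acc b h
    cases acc with
    | nil => simp at h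
    | cons a rest =>
      have hab : a = b := by simpa using h
      subst hab
      simp only [List.foldl_cons]
      by_cases hlt : key a < key x
      · rw [show PySem.List.insertBy (fun u v => decide (key v < key u)) x (a :: rest)
            = x :: a :: rest by simp [PySem.List.insertBy, hlt]]
        rw [ih _ x (by simp), if_pos hlt]
      · rw [show PySem.List.insertBy (fun u v => decide (key v < key u)) x (a :: rest)
            = a :: PySem.List.insertBy (fun u v => decide (key v < key u)) x rest by
              simp [PySem.List.insertBy, hlt]]
        rw [ih _ a (by simp), if_neg hlt]

-- the running max over the decorated pairs is the decoration of the running max over strings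
theorem foldl_pairmax_map (k : String → Int) :
    ∀ (t : List String) (b : String),
      (t.map (fun s => (k s, s))).foldl
          (fun best x => if best.1 < x.1 then x else best) (k b, b)
        = (fun m => (k m, m)) (t.foldl (fun best x => if k best < k x then x else best) b) := by
  intro t
  induction t with
  | nil => intro b; rfl
  | cons x xs ih =>
    intro b
    simp only [List.map_cons, List.foldl_cons]
    by_cases hlt : k b < k x
    · simp only [if_pos hlt]; exact ih x
    · simp only [if_neg hlt]; exact ih b

-- for a qualifying string, the key is three find-ranks and pvRankS packs them base 37
theorem key_decomp (chars s : String) (h : pvCond chars s = true) :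
    ∃ a b c : Int,
      pvLast3Key s = [a, b, c] ∧
      (-1 ≤ a ∧ a ≤ 35) ∧ (-1 ≤ b ∧ b ≤ 35) ∧ (-1 ≤ c ∧ c ≤ 35) ∧
      pvRankS s = ((0 * 37 + a + 1) * 37 + b + 1) * 37 + c + 1 := by
  unfold pvCond at h
  simp only [Bool.and_eq_true, decide_eq_true_eq] at h
  obtain ⟨h4, -⟩ := h
  unfold pvTail4 at h4
  set fp := PySem.List.pyGetD (PySem.Chars.splitOn s.toList ['/']) 0 [] with hfp
  by_cases hlen : 4 ≤ fp.length
  · have hdrop4 : PySem.List.slice fp (some (-4)) none = fp.drop (fp.length - 4) :=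
      slice_neg4 fp hlen
    have hdrop3 : PySem.List.slice fp (some (-3)) none = fp.drop (fp.length - 3) :=
      slice_neg3 fp (by omega)
    have hlen4 : (fp.drop (fp.length - 4)).length = 4 := by simp; omega
    obtain ⟨c0, c1, c2, c3, hd4⟩ := List.length_eq_four.mp hlen4
    · have hrest : fp.drop (fp.length - 3) = [c1, c2, c3] := by
        have : fp.drop (fp.length - 3) = (fp.drop (fp.length - 4)).drop 1 := by
          rw [List.drop_drop]; congr 1; omega
        rw [this, hd4]; rfl
      refine ⟨_, _, _, ?_, find_bounds c1, find_bounds c2, find_bounds c3, ?_⟩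
      · unfold pvLast3Key pvTail4
        rw [← hfp, if_pos hlen]
        simp only [PySem.Chars.slice, hdrop4, hd4]
        rw [PySem.List.slice_from _ (by omega : (0:Int) ≤ 1)]
        simp [rank_eq]
      · unfold pvRankS pvRank
        rw [← hfp]
        simp only [PySem.Chars.slice, hdrop3, hrest]
        simp [List.foldl_cons]
  · rw [if_neg hlen] at h4; omega
-- (the 4-char case is forced: length fp < 4 contradicts len(tail4) == 4)

-- packed base-37 comparison IS tuple lexicographic comparison (components in [-1, 35])
theorem pack_lt (a b c d e f : Int)
    (ha : -1 ≤ a ∧ a ≤ 35) (hb : -1 ≤ b ∧ b ≤ 35) (hc : -1 ≤ c ∧ c ≤ 35)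
    (hd : -1 ≤ d ∧ d ≤ 35) (he : -1 ≤ e ∧ e ≤ 35) (hf : -1 ≤ f ∧ f ≤ 35) :
    pvKeyLt [a, b, c] [d, e, f]
      = decide (((0 * 37 + a + 1) * 37 + b + 1) * 37 + c + 1
          < ((0 * 37 + d + 1) * 37 + e + 1) * 37 + f + 1) := by
  simp only [pvKeyLt]
  split_ifs <;> simp <;> omega

-- A's running max (tuple keys) = B's running max (packed keys), on qualifying strings
set_option maxHeartbeats 1000000 in
theorem fold_max_eq (chars : String) :
    ∀ (t : List String) (b : String), pvCond chars b = true →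
      (∀ x ∈ t, pvCond chars x = true) →
      t.foldl (fun best x => if pvKeyLt (pvLast3Key best) (pvLast3Key x) then x else best) b
        = t.foldl (fun best x => if pvRankS best < pvRankS x then x else best) b := by
  intro t
  induction t with
  | nil => intro b _ _; rfl
  | cons x xs ih =>
    intro b hbq htq
    have hxq : pvCond chars x = true := htq x (by simp)
    obtain ⟨a1, b1, c1, hk1, ha1, hb1, hc1, hr1⟩ := key_decomp chars b hbq
    obtain ⟨a2, b2, c2, hk2, ha2, hb2, hc2, hr2⟩ := key_decomp chars x hxq
    have hcmp : pvKeyLt (pvLast3Key b) (pvLast3Key x) = decide (pvRankS b < pvRankS x) := by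
      rw [hk1, hk2, hr1, hr2]
      exact pack_lt a1 b1 c1 a2 b2 c2 ha1 hb1 hc1 ha2 hb2 hc2
    simp only [List.foldl_cons, hcmp]
    by_cases hlt : pvRankS b < pvRankS x
    · simp only [hlt, decide_true, if_pos]
      exact ih x hxq (fun y hy => htq y (by simp [hy]))
    · simp only [hlt, decide_false, Bool.false_eq_true, if_false, if_neg hlt]
      exact ih b hbq (fun y hy => htq y (by simp [hy]))

-- ===== VERDICT (by name: the statement is the Claim_ definition above) =====
theorem getLatestVersion_spec : Claim_equal_getLatestVersion := by
  intro version_list chars _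
  unfold Spec_getLatestVersion getLatestVersion_alt
  rw [decorated_eq]
  cases hf : version_list.filter (pvCond chars) with
  | nil => simp [getLatestVersion, hf, PySem.List.sorted]
  | cons h t =>
    have hhead : pvCond chars h = true :=
      List.of_mem_filter (l := version_list) (by rw [hf]; exact List.mem_cons_self)
    have hmem : ∀ x ∈ t, pvCond chars x = true := by
      intro x hx
      exact List.of_mem_filter (l := version_list) (by rw [hf]; exact List.mem_cons_of_mem _ hx)
    simp only [getLatestVersion, hf]
    rw [PySem.List.sorted_rev_eq_foldl_insertBy]
    simp only [List.map_cons, List.foldl_cons]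
    have h1 : PySem.List.insertBy
        (fun a b => decide ((Prod.fst b : Int) < Prod.fst a)) (pvRankS h, h) ([] : List (Int × String))
        = [(pvRankS h, h)] := by simp [PySem.List.insertBy]
    rw [h1]
    have hhd := head_foldl_insertBy Prod.fst (t.map (fun s => (pvRankS s, s)))
      [(pvRankS h, h)] (pvRankS h, h) (by simp)
    rw [foldl_pairmax_map pvRankS t h] at hhd
    rw [fold_max_eq chars t h hhead hmem]
    cases hs : (List.foldl (fun acc x => PySem.List.insertBy (fun a b => decide (b.1 < a.1)) x acc)
        [(pvRankS h, h)] (t.map (fun s => (pvRankS s, s)))) with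
    | nil => rw [hs] at hhd; simp at hhd
    | cons p ps =>
      rw [hs] at hhd
      simp only [List.head?_cons, Option.some.injEq] at hhd
      rw [hhd]
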